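-- pv_equiv track=rewrite | github.com/Haroong/Algorithm | BaekJoon Online Judge/Silver/24484-알고리즘 수업-깊이 우선 탐색 6.py | dfs
-- ===== SOURCE A (Python) =====
-- def dfs(graph, visited, start, result, depth):
--     depth += 1 # 노드의 깊이
--
--     for node in graph[start]:
--         if node not in visited:
--             visited.add(node) # 현재 노드 방문 처리
--             result[node - 1] = depth * len(visited)
--             dfs(graph, visited, node, result, depth)
--
--     return result
-- ===== SOURCE B (Python) =====
-- def dfs(graph, visited, start, result, depth):
--     stack = [(depth + 1, iter(graph[start]))]
--     while stack:
--         d, it = stack[-1]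
--         node = next(it, None)
--         if node is None:
--             stack.pop()
--         elif node not in visited:
--             visited.add(node)
--             result[node - 1] = d * len(visited)
--             stack.append((d + 1, iter(graph[node])))
--     return result
-- ===== Notes on version B (the rewrite author's own statement) =====
-- stated objective: alternative
-- what changed: A's recursive DFS (implicit call stack, one recursive call per newly visited node) is replaced by an iterative DFS driven by an explicit stack of (depth, neighbour-iterator) frames that pops a frame when its iterator is exhausted; same traversal order and cost, no recursion.
-- outside the precondition, e.g. on dfs({1: [], 2: [9], 3: [2]}, set(), 1, [0], 0): A returns [0], B returns [0]
import Mathlib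
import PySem

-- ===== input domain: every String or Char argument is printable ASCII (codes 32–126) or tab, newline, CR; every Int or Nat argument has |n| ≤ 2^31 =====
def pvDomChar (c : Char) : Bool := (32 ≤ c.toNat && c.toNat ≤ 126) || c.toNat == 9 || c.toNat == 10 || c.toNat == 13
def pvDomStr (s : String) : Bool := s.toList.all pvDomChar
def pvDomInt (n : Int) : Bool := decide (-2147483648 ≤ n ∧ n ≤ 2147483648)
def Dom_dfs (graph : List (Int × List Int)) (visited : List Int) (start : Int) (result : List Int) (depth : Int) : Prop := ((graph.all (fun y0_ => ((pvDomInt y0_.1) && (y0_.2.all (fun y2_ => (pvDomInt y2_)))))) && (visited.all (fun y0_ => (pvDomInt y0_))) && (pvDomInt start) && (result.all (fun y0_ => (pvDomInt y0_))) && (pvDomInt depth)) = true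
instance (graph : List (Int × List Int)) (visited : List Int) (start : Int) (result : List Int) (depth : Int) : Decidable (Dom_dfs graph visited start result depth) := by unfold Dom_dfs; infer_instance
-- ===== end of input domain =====

-- B replaces A's recursive DFS by an iterative DFS over an explicit stack of (depth, remaining-neighbours)
-- frames (objective: alternative decomposition, same cost). Both A and B mutate `visited` and `result` in
-- place in Python (identically); the equivalence proved here is about the returned list.

-- ===== PORT A =====
-- fuel: an upper bound on the number of loop/recursion events; a pure totality guard
-- (on every input admitted by Pre_dfs it is never exhausted; the proved equality holds for any fuel).
def dfsFuel (graph : List (Int × List Int)) : Nat :=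
  3 * ((graph.map (fun p => p.2.length)).sum + graph.length) + 3

-- A's `for node in graph[start]` loop with the recursive call inlined at the visit step; the returned
-- Nat is the leftover fuel (the subtype bound `≤ fuel` only justifies termination).
def dfsGoA (graph : List (Int × List Int)) : (fuel : Nat) → List Int → List Int → Int → List Int →
    {p : Nat × List Int × List Int // p.1 ≤ fuel}
  | 0, v, _, _, r => ⟨(0, v, r), le_refl 0⟩
  | fuel + 1, v, adj, d, r =>
    match adj with
    | [] => ⟨(fuel, v, r), by omega⟩
    | n :: rest =>
      if PySem.Set.contains v n then
        -- node in visited: continue the for-loop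
        let ⟨p, h⟩ := dfsGoA graph fuel v rest d r
        ⟨p, by omega⟩
      else
        -- visited.add(node); result[node - 1] = depth * len(visited)
        let v' := PySem.Set.add v n
        let r' := PySem.List.pySetD r (n - 1) (d * PySem.Set.len v')
        match List.lookup n graph with
        | none =>
          -- graph[node] raises KeyError in Python: excluded by Pre_dfs
          let ⟨p, h⟩ := dfsGoA graph fuel v' rest d r'
          ⟨p, by omega⟩
        | some adj2 =>
          -- recursive call dfs(graph, visited, node, result, depth), then continue the loop
          let ⟨(f1, v1, r1), h1⟩ := dfsGoA graph fuel v' adj2 (d + 1) r'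
          let ⟨p, h2⟩ := dfsGoA graph f1 v1 rest d r1
          ⟨p, by omega⟩
  termination_by fuel => fuel
  decreasing_by all_goals omega

def dfs (graph : List (Int × List Int)) (visited : List Int) (start : Int) (result : List Int) (depth : Int) : List Int :=
  match List.lookup start graph with
  | none => result  -- graph[start] raises KeyError in Python: excluded by Pre_dfs
  | some adj => (dfsGoA graph (dfsFuel graph) visited adj (depth + 1) result).val.2.2

-- ===== PORT B =====
-- B's while-loop over the explicit stack; each frame is (depth, neighbours not yet drawn from the
-- frame's iterator); one fuel unit per loop iteration (pure totality guard, as above).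
def dfsRunB (graph : List (Int × List Int)) : Nat → List (Int × List Int) → List Int → List Int → List Int
  | 0, _, _, r => r
  | _ + 1, [], _, r => r                      -- while stack: exhausted
  | fuel + 1, (d, adj) :: stack, v, r =>
    match adj with
    | [] => dfsRunB graph fuel stack v r      -- next(it, None) is None: stack.pop()
    | n :: rest =>
      if PySem.Set.contains v n then
        dfsRunB graph fuel ((d, rest) :: stack) v r
      else
        let v' := PySem.Set.add v n
        let r' := PySem.List.pySetD r (n - 1) (d * PySem.Set.len v')
        match List.lookup n graph with
        | none => dfsRunB graph fuel ((d, rest) :: stack) v' r'  -- KeyError in Python: excluded by Pre_dfs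
        | some adj2 => dfsRunB graph fuel ((d + 1, adj2) :: (d, rest) :: stack) v' r'

def dfs_alt (graph : List (Int × List Int)) (visited : List Int) (start : Int) (result : List Int) (depth : Int) : List Int :=
  match List.lookup start graph with
  | none => result  -- graph[start] raises KeyError in Python: excluded by Pre_dfs
  | some adj => dfsRunB graph (dfsFuel graph) [(depth + 1, adj)] visited result

-- ===== PRECONDITION & SPEC =====
-- Pre_dfs excludes exactly inputs on which the Python (both A and B) can raise: start must be a graph
-- key, and every neighbour n listed under a "relevant" key (start itself, or an unvisited key that occurs
-- as some node's neighbour) must be already visited or be a graph key whose result slot n-1 is a valid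
-- Python index. This is slightly conservative: it also excludes inputs whose only bad neighbours sit in
-- adjacency lists of relevant but unreachable keys, on which A still returns (see the cite in claim.json).
def Pre_dfs (graph : List (Int × List Int)) (visited : List Int) (start : Int) (result : List Int) (depth : Int) : Prop :=
  (List.lookup start graph).isSome = true ∧
  ∀ p ∈ graph, (p.1 = start ∨ (p.1 ∉ visited ∧ ∃ q ∈ graph, p.1 ∈ q.2)) →
    ∀ n ∈ p.2, n ∈ visited ∨
      ((List.lookup n graph).isSome = true ∧ PySem.Raise.InRange result.length (n - 1))
instance (graph : List (Int × List Int)) (visited : List Int) (start : Int) (result : List Int) (depth : Int) : Decidable (Pre_dfs graph visited start result depth) := by unfold Pre_dfs; infer_instance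

def pvWitness_dfs : (List (Int × List Int)) × List Int × Int × List Int × Int :=
  ([(1, [2, 3]), (2, [3]), (3, [])], [], 1, [0, 0, 0], 0)

def Spec_dfs (graph : List (Int × List Int)) (visited : List Int) (start : Int) (result : List Int) (depth : Int) (out : List Int) : Prop := out = dfs_alt graph visited start result depth
instance (graph : List (Int × List Int)) (visited : List Int) (start : Int) (result : List Int) (depth : Int) (out : List Int) : Decidable (Spec_dfs graph visited start result depth out) := by unfold Spec_dfs; infer_instance

-- ===== CLAIM (what is proved, stated in full; the proofs are below) =====
def Claim_equal_dfs : Prop := ∀ (graph : List (Int × List Int)) (visited : List Int) (start : Int) (result : List Int) (depth : Int), Dom_dfs graph visited start result depth → Pre_dfs graph visited start result depth → Spec_dfs graph visited start result depth (dfs graph visited start result depth)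

-- ===== LEMMAS AND PROOFS =====

-- The stack machine run on an empty stack is done, whatever the fuel.
theorem dfsRunB_nil (graph : List (Int × List Int)) (fuel : Nat) (v r : List Int) :
    dfsRunB graph fuel [] v r = r := by
  cases fuel <;> simp [dfsRunB]

-- Simulation: running B's machine with a frame (d, adj) on top is A's loop over adj at depth d,
-- followed by the machine on the rest of the stack with the leftover fuel and the updated state.
theorem dfsRunB_eq_goA (graph : List (Int × List Int)) :
    ∀ (fuel : Nat) (d : Int) (adj : List Int) (stack : List (Int × List Int)) (v r : List Int),
      dfsRunB graph fuel ((d, adj) :: stack) v r =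
        dfsRunB graph (dfsGoA graph fuel v adj d r).val.1 stack
          (dfsGoA graph fuel v adj d r).val.2.1 (dfsGoA graph fuel v adj d r).val.2.2 := by
  intro fuel
  induction fuel using Nat.strong_induction_on with
  | _ fuel ih =>
    intro d adj stack v r
    match fuel with
    | 0 => simp [dfsRunB, dfsGoA]
    | fuel + 1 =>
      match adj with
      | [] => simp [dfsRunB, dfsGoA]
      | n :: rest =>
        by_cases hc : PySem.Set.contains v n
        · simp only [dfsRunB, dfsGoA, hc, if_true]
          exact ih fuel (by omega) d rest stack v r
        · simp only [dfsRunB, dfsGoA, hc]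
          cases hg : List.lookup n graph with
          | none =>
            simp only []
            exact ih fuel (by omega) d rest stack _ _
          | some adj2 =>
            simp only [Bool.false_eq_true, if_false]
            rw [ih fuel (by omega) (d + 1) adj2 ((d, rest) :: stack) _ _]
            have h1 : (dfsGoA graph fuel (PySem.Set.add v n) adj2 (d + 1)
                (PySem.List.pySetD r (n - 1) (d * PySem.Set.len (PySem.Set.add v n)))).val.1 ≤ fuel :=
              (dfsGoA graph fuel _ adj2 (d + 1) _).property
            rw [ih _ (by omega) d rest stack _ _]

theorem dfs_spec : Claim_equal_dfs := by
  intro graph visited start result depth _ _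
  unfold Spec_dfs dfs dfs_alt
  cases List.lookup start graph with
  | none => rfl
  | some adj =>
    simp only []
    rw [dfsRunB_eq_goA, dfsRunB_nil]
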